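-- pv_equiv track=rewrite | github.com/oceantracker/oceantracker | generate_environment_yaml.py | resolve_optional_dependencies
-- ===== SOURCE A (Python) =====
-- def resolve_optional_dependencies(optional_deps, group_name, visited=None):
--     """
--     Recursively resolve optional dependencies, handling references to other groups.
--
--     Args:
--         optional_deps: Dict of all optional dependencies from pyproject.toml
--         group_name: Name of the group to resolve
--         visited: Set of already visited groups (to prevent circular references)
--
--     Returns:
--         List of resolved dependency strings
--     """
--     if visited is None:
--         visited = set()
--
--     if group_name in visited:
--         return []
--
--     visited.add(group_name)
--     resolved = []
--
--     for dep in optional_deps.get(group_name, []):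
--         # Check if this dependency is a reference to another optional group
--         if dep in optional_deps:
--             # Recursively resolve the referenced group
--             resolved.extend(resolve_optional_dependencies(optional_deps, dep, visited))
--         else:
--             # It's an actual package dependency
--             resolved.append(dep)
--
--     return resolved
-- ===== SOURCE B (Python) =====
-- def resolve_optional_dependencies(optional_deps, group_name, visited=None):
--     """Iterative DFS with an explicit stack of iterators (no recursion)."""
--     if visited is None:
--         visited = set()
--     if group_name in visited:
--         return []
--     visited.add(group_name)
--     resolved = []
--     stack = [iter(optional_deps.get(group_name, []))]
--     while stack:
--         dep = next(stack[-1], None)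
--         if dep is None:
--             stack.pop()
--         elif dep in optional_deps:
--             if dep not in visited:
--                 visited.add(dep)
--                 stack.append(iter(optional_deps.get(dep, [])))
--         else:
--             resolved.append(dep)
--     return resolved
-- ===== Notes on version B (the rewrite author's own statement) =====
-- stated objective: alternative
-- what changed: The recursive DFS over optional-dependency groups is replaced by an iterative loop over an explicit stack of live iterators (remaining dependency lists), reproducing the same pre-order expansion and visited-set updates without recursion.
import Mathlib
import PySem

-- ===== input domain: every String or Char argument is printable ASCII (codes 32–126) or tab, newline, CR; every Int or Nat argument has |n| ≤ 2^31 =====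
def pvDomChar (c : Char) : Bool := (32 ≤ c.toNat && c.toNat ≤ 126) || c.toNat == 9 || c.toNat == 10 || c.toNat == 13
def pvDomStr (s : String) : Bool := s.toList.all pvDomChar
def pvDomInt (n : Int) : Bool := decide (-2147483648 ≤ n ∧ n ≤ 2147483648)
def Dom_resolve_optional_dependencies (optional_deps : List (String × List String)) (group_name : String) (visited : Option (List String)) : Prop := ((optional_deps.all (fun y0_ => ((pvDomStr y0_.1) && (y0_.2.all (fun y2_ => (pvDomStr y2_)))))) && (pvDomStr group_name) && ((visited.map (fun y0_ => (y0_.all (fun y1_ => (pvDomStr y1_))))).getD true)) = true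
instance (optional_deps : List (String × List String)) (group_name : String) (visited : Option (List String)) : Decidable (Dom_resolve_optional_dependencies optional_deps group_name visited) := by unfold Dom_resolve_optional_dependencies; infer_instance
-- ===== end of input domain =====

-- B replaces A's recursion by an iterative DFS over an explicit stack of pending
-- dependency lists (objective: alternative).  Both A and B mutate the caller's
-- `visited` set identically; the equivalence proved here is about the return value.

-- ===== PORT A =====
-- pvMu: number of dict keys not yet visited; pvS: total size of all dependency
-- lists.  Both only serve as the termination measure of the ports.
def pvMu (od : PySem.Dict String (List String)) (v : PySem.Set String) : Nat :=
  ((PySem.Dict.keys od).filter (fun k => !(PySem.Set.contains v k))).length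

def pvS (od : PySem.Dict String (List String)) : Nat :=
  ((PySem.Dict.values od).map List.length).sum

-- μ never grows when an element is added to the visited set
theorem pvMu_add_le (od : PySem.Dict String (List String)) (v : PySem.Set String) (g : String) :
    pvMu od (PySem.Set.add v g) ≤ pvMu od v := by
  unfold pvMu
  rw [← List.countP_eq_length_filter, ← List.countP_eq_length_filter]
  apply List.countP_mono_left
  intro k _ hk
  simp only [Bool.not_eq_eq_eq_not, Bool.not_true, PySem.Set.contains_eq_listContains,
    List.contains_eq_mem, decide_eq_false_iff_not] at *
  intro hmem
  exact hk (by simpa [PySem.Set.mem_add] using Or.inl hmem)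

-- μ strictly drops when an unvisited KEY is added
theorem pvMu_add_lt (od : PySem.Dict String (List String)) (v : PySem.Set String) (g : String)
    (hg : g ∈ PySem.Dict.keys od) (hv : g ∉ v) :
    pvMu od (PySem.Set.add v g) < pvMu od v := by
  unfold pvMu
  have hsub : ∀ k ∈ PySem.Dict.keys od,
      (!(PySem.Set.contains (PySem.Set.add v g) k)) = true → (!(PySem.Set.contains v k)) = true := by
    intro k _ hk
    simp only [Bool.not_eq_eq_eq_not, Bool.not_true, PySem.Set.contains_eq_listContains,
      List.contains_eq_mem, decide_eq_false_iff_not] at *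
    intro hmem
    exact hk (by simpa [PySem.Set.mem_add] using Or.inl hmem)
  have h1 : ((PySem.Dict.keys od).filter (fun k => !(PySem.Set.contains (PySem.Set.add v g) k)))
      = ((PySem.Dict.keys od).filter (fun k => !(PySem.Set.contains v k))).filter
          (fun k => !(PySem.Set.contains (PySem.Set.add v g) k)) := by
    rw [List.filter_filter]
    apply List.filter_congr
    intro k hk
    by_cases h1 : k ∈ v <;> by_cases h2 : k = g <;>
      simp [PySem.Set.contains_eq_listContains, List.contains_eq_mem, PySem.Set.mem_add, h1, h2]
  rw [h1]
  apply List.length_filter_lt_length_iff_exists.2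
  refine ⟨g, ?_, ?_⟩
  · simp only [List.mem_filter]
    refine ⟨hg, ?_⟩
    simp [PySem.Set.contains_eq_listContains, List.contains_eq_mem, hv]
  · simp [PySem.Set.contains_eq_listContains, List.contains_eq_mem, PySem.Set.mem_add]

-- a dependency list looked up in the dict is no longer than pvS
theorem pvGetD_len_le (od : PySem.Dict String (List String)) (g : String) :
    (PySem.Dict.getD od g []).length ≤ pvS od := by
  rcases h : PySem.Dict.get? od g with _ | l
  · simp [PySem.Dict.getD_eq_get?_getD, h]
  · have hl : l ∈ PySem.Dict.values od := by
      have := PySem.Dict.mem_items_of_get?_eq_some od h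
      simp only [PySem.Dict.values]
      exact List.mem_map.2 ⟨(g, l), this, rfl⟩
    have : l.length ∈ (PySem.Dict.values od).map List.length := List.mem_map.2 ⟨l, hl, rfl⟩
    calc (PySem.Dict.getD od g []).length = l.length := by
            simp [PySem.Dict.getD_eq_get?_getD, h]
      _ ≤ pvS od := List.single_le_sum (by intro x _; exact Nat.zero_le x) _ this

-- decreasing facts for the termination measures (named so the recursive
-- definitions carry only small proof terms)
theorem pvDecStep (od : PySem.Dict String (List String)) (v v' : PySem.Set String)
    (ds : List String) (h : pvMu od v' ≤ pvMu od v) :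
    (pvS od + 2) * pvMu od v' + ds.length < (pvS od + 2) * pvMu od v + (ds.length + 1) := by
  have := Nat.mul_le_mul_left (pvS od + 2) h
  omega

theorem pvDecEnter (od : PySem.Dict String (List String)) (v : PySem.Set String)
    (d : String) (ds : List String)
    (hk : PySem.Dict.contains od d = true) (hd : d ∉ v) :
    (pvS od + 2) * pvMu od (PySem.Set.add v d) + (PySem.Dict.getD od d []).length
    < (pvS od + 2) * pvMu od v + (ds.length + 1) := by
  have hlt := pvMu_add_lt od v d (by simpa [PySem.Dict.contains_iff_mem_keys] using hk) hd
  have hlen := pvGetD_len_le od d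
  have hmul : (pvS od + 2) * (pvMu od (PySem.Set.add v d) + 1) ≤ (pvS od + 2) * pvMu od v :=
    Nat.mul_le_mul_left _ hlt
  rw [Nat.mul_add, Nat.mul_one] at hmul
  omega

theorem pvDecPop (od : PySem.Dict String (List String)) (v : PySem.Set String)
    (rest : List (List String)) :
    (pvS od + 2) * pvMu od v + (rest.map (fun l => l.length + 1)).sum
    < (pvS od + 2) * pvMu od v + ((([] : List String) :: rest).map (fun l => l.length + 1)).sum := by
  simp only [List.map_cons, List.sum_cons]
  omega

theorem pvDecSkip (od : PySem.Dict String (List String)) (v : PySem.Set String)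
    (d : String) (ds : List String) (rest : List (List String)) :
    (pvS od + 2) * pvMu od v + ((ds :: rest).map (fun l => l.length + 1)).sum
    < (pvS od + 2) * pvMu od v + (((d :: ds) :: rest).map (fun l => l.length + 1)).sum := by
  simp only [List.map_cons, List.sum_cons, List.length_cons]
  omega

theorem pvDecPush (od : PySem.Dict String (List String)) (v : PySem.Set String)
    (d : String) (ds : List String) (rest : List (List String))
    (hk : PySem.Dict.contains od d = true) (hv : d ∉ v) :
    (pvS od + 2) * pvMu od (PySem.Set.add v d)
        + ((PySem.Dict.getD od d [] :: ds :: rest).map (fun l => l.length + 1)).sum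
    < (pvS od + 2) * pvMu od v + (((d :: ds) :: rest).map (fun l => l.length + 1)).sum := by
  have hlt := pvMu_add_lt od v d (by simpa [PySem.Dict.contains_iff_mem_keys] using hk) hv
  have hlen := pvGetD_len_le od d
  have hmul : (pvS od + 2) * (pvMu od (PySem.Set.add v d) + 1) ≤ (pvS od + 2) * pvMu od v :=
    Nat.mul_le_mul_left _ hlt
  rw [Nat.mul_add, Nat.mul_one] at hmul
  simp only [List.map_cons, List.sum_cons, List.length_cons]
  omega

-- literal transliteration of A's recursion: pvGoA is A's `for dep in …` loop,
-- threading the mutated visited set as a value; A's recursive call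
-- `resolve_optional_dependencies(optional_deps, dep, visited)` is inlined
-- (its `dep in visited` guard and `visited.add(dep)` appear inline, then its
-- own loop is the nested pvGoA call on the looked-up dependency list).
-- The subtype on the returned visited set records only that the loop never
-- shrinks the unvisited-key count — needed for termination, no computational
-- content.
def pvGoA (od : PySem.Dict String (List String)) (v : PySem.Set String)
    (deps : List String) (resolved : List String) :
    List String × {v' : PySem.Set String // pvMu od v' ≤ pvMu od v} :=
  match deps with
  | [] => (resolved, ⟨v, le_rfl⟩)
  | d :: ds =>
    if hk : PySem.Dict.contains od d then
      if hd : d ∈ v then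
        -- the recursive call returns [] and leaves visited unchanged
        pvGoA od v ds resolved
      else
        -- the recursive call: add d to visited, resolve its dependency list
        let r := pvGoA od (PySem.Set.add v d) (PySem.Dict.getD od d []) []
        let r2 := pvGoA od r.2.1 ds (resolved ++ r.1)
        (r2.1, ⟨r2.2.1, le_trans r2.2.2 (le_trans r.2.2 (pvMu_add_le od v d))⟩)
    else
      pvGoA od v ds (resolved ++ [d])
termination_by (pvS od + 2) * pvMu od v + deps.length
decreasing_by
  · exact pvDecStep od v v ds le_rfl
  · exact pvDecEnter od v d ds hk hd
  · exact pvDecStep od v r.2.1 ds (le_trans r.2.2 (pvMu_add_le od v d))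
  · exact pvDecStep od v v ds le_rfl

def resolve_optional_dependencies (optional_deps : List (String × List String)) (group_name : String) (visited : Option (List String)) : List String :=
  let od := PySem.Dict.ofList optional_deps
  let v : PySem.Set String := match visited with
    | none => PySem.Set.empty
    | some l => PySem.Set.ofList l
  if group_name ∈ v then []
  else (pvGoA od (PySem.Set.add v group_name) (PySem.Dict.getD od group_name []) []).1

-- ===== PORT B =====
-- literal transliteration of B's while-loop: the stack holds, for each live
-- iterator, its remaining elements; pop on exhaustion, push the looked-up list
-- for an unvisited group, append leaves to `resolved`.
def pvAltLoop (od : PySem.Dict String (List String)) (v : PySem.Set String)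
    (stack : List (List String)) (resolved : List String) : List String :=
  match stack with
  | [] => resolved
  | [] :: rest => pvAltLoop od v rest resolved
  | (d :: ds) :: rest =>
    if PySem.Dict.contains od d then
      if d ∈ v then pvAltLoop od v (ds :: rest) resolved
      else pvAltLoop od (PySem.Set.add v d) (PySem.Dict.getD od d [] :: ds :: rest) resolved
    else pvAltLoop od v (ds :: rest) (resolved ++ [d])
termination_by (pvS od + 2) * pvMu od v + (stack.map (fun l => l.length + 1)).sum
decreasing_by
  · exact pvDecPop od v rest
  · exact pvDecSkip od v d ds rest
  · rename_i hk hv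
    exact pvDecPush od v d ds rest hk hv
  · exact pvDecSkip od v d ds rest

def resolve_optional_dependencies_alt (optional_deps : List (String × List String)) (group_name : String) (visited : Option (List String)) : List String :=
  let od := PySem.Dict.ofList optional_deps
  let v : PySem.Set String := match visited with
    | none => PySem.Set.empty
    | some l => PySem.Set.ofList l
  if group_name ∈ v then []
  else pvAltLoop od (PySem.Set.add v group_name) [PySem.Dict.getD od group_name []] []

-- ===== PRECONDITION & SPEC =====
def Spec_resolve_optional_dependencies (optional_deps : List (String × List String)) (group_name : String) (visited : Option (List String)) (out : List String) : Prop := out = resolve_optional_dependencies_alt optional_deps group_name visited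
instance (optional_deps : List (String × List String)) (group_name : String) (visited : Option (List String)) (out : List String) : Decidable (Spec_resolve_optional_dependencies optional_deps group_name visited out) := by unfold Spec_resolve_optional_dependencies; infer_instance

-- ===== CLAIM (what is proved, stated in full; the proofs are below) =====
def Claim_equal_resolve_optional_dependencies : Prop := ∀ (optional_deps : List (String × List String)) (group_name : String) (visited : Option (List String)), Dom_resolve_optional_dependencies optional_deps group_name visited → Spec_resolve_optional_dependencies optional_deps group_name visited (resolve_optional_dependencies optional_deps group_name visited)

-- ===== LEMMAS AND PROOFS =====

-- the accumulator of A's loop only prefixes the result and does not affect the visited set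
theorem pvGoA_acc (od : PySem.Dict String (List String)) (deps : List String) :
    ∀ (v : PySem.Set String) (acc : List String),
      (pvGoA od v deps acc).1 = acc ++ (pvGoA od v deps []).1 ∧
      (pvGoA od v deps acc).2.1 = (pvGoA od v deps []).2.1 := by
  induction deps with
  | nil => intro v acc; simp [pvGoA]
  | cons d ds ih =>
    intro v acc
    by_cases hk : PySem.Dict.contains od d
    · by_cases hd : d ∈ v
      · simp only [pvGoA]
        rw [dif_pos hk, dif_pos hk, dif_pos hd, dif_pos hd]
        exact ih v acc
      · simp only [pvGoA]
        rw [dif_pos hk, dif_pos hk, dif_neg hd, dif_neg hd]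
        simp only
        set r := pvGoA od (PySem.Set.add v d) (PySem.Dict.getD od d []) []
        obtain ⟨h1, h2⟩ := ih r.2.1 (acc ++ r.1)
        obtain ⟨h1', h2'⟩ := ih r.2.1 ([] ++ r.1)
        constructor
        · rw [h1, h1']; simp
        · rw [h2, h2']
    · simp only [pvGoA]
      rw [dif_neg hk, dif_neg hk]
      obtain ⟨h1, h2⟩ := ih v (acc ++ [d])
      obtain ⟨h1', h2'⟩ := ih v ([] ++ [d])
      constructor
      · rw [h1, h1']; simp
      · rw [h2, h2']

-- B's loop processes the top stack entry exactly as A's loop does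
theorem pvAltLoop_fold (od : PySem.Dict String (List String)) :
    ∀ (n : Nat) (v : PySem.Set String) (deps : List String),
      (pvS od + 2) * pvMu od v + deps.length ≤ n →
      ∀ (rest : List (List String)) (resolved : List String),
        pvAltLoop od v (deps :: rest) resolved =
          pvAltLoop od (pvGoA od v deps resolved).2.1 rest (pvGoA od v deps resolved).1 := by
  intro n
  induction n with
  | zero =>
    intro v deps h rest resolved
    have : deps = [] := by
      cases deps with
      | nil => rfl
      | cons d ds => exfalso; simp only [List.length_cons] at h; omega
    subst this
    simp [pvAltLoop, pvGoA]
  | succ n ih =>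
    intro v deps h rest resolved
    cases deps with
    | nil => simp [pvAltLoop, pvGoA]
    | cons d ds =>
      by_cases hk : PySem.Dict.contains od d
      · by_cases hv : d ∈ v
        · -- visited group: both sides skip it
          rw [pvAltLoop]
          simp only [hk, if_pos, hv, ite_true]
          rw [ih v ds (by simp only [List.length_cons] at h; omega) rest resolved]
          congr 1
          · rw [pvGoA]; simp [hk, hv]
          · rw [pvGoA]; simp [hk, hv]
        · -- new group: B pushes its dependency list, A recurses into it
          have hb1 : (pvS od + 2) * pvMu od (PySem.Set.add v d) + (PySem.Dict.getD od d []).length ≤ n := by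
            have := pvDecEnter od v d ds hk hv
            simp only [List.length_cons] at h
            omega
          rw [pvAltLoop]
          simp only [hk, if_pos, hv, ite_false, if_neg hv]
          rw [ih (PySem.Set.add v d) (PySem.Dict.getD od d []) hb1 (ds :: rest) resolved]
          set F1 := pvGoA od (PySem.Set.add v d) (PySem.Dict.getD od d []) resolved with hF1
          have hb2 : (pvS od + 2) * pvMu od F1.2.1 + ds.length ≤ n := by
            have hd := pvDecStep od v F1.2.1 ds (le_trans F1.2.2 (pvMu_add_le od v d))
            simp only [List.length_cons] at h
            omega
          rw [ih F1.2.1 ds hb2 rest F1.1]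
          -- fold the two A-side recursions back into pvGoA on (d :: ds)
          obtain ⟨ha1, ha2⟩ := pvGoA_acc od (PySem.Dict.getD od d []) (PySem.Set.add v d) resolved
          obtain ⟨hc1, hc2⟩ := pvGoA_acc od ds F1.2.1 F1.1
          have hstep1 : (pvGoA od v (d :: ds) resolved).1 = (pvGoA od F1.2.1 ds F1.1).1 := by
            rw [pvGoA]
            rw [dif_pos hk, dif_neg hv]
            simp only
            obtain ⟨hb1', hb2'⟩ := pvGoA_acc od ds
              ((pvGoA od (PySem.Set.add v d) (PySem.Dict.getD od d []) []).2.1)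
              (resolved ++ (pvGoA od (PySem.Set.add v d) (PySem.Dict.getD od d []) []).1)
            simp only at *
            rw [hb1']
            rw [hc1, ha1, ha2]
          have hstep2 : (pvGoA od v (d :: ds) resolved).2.1 = (pvGoA od F1.2.1 ds F1.1).2.1 := by
            rw [pvGoA]
            rw [dif_pos hk, dif_neg hv]
            simp only
            obtain ⟨hb1', hb2'⟩ := pvGoA_acc od ds
              ((pvGoA od (PySem.Set.add v d) (PySem.Dict.getD od d []) []).2.1)
              (resolved ++ (pvGoA od (PySem.Set.add v d) (PySem.Dict.getD od d []) []).1)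
            simp only at *
            rw [hb2', hc2, ha2]
          rw [← hstep1, ← hstep2]
      · -- leaf dependency: both sides append it
        rw [pvAltLoop]
        simp only [hk, if_neg, Bool.false_eq_true, not_false_iff]
        rw [ih v ds (by simp only [List.length_cons] at h; omega) rest (resolved ++ [d])]
        congr 1
        · rw [pvGoA]; simp [hk]
        · rw [pvGoA]; simp [hk]

-- ===== VERDICT (by name: the statement is the Claim_ definition above) =====
theorem resolve_optional_dependencies_spec : Claim_equal_resolve_optional_dependencies := by
  intro optional_deps group_name visited _
  unfold Spec_resolve_optional_dependencies
  have main : ∀ (od : PySem.Dict String (List String)) (v : PySem.Set String),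
      (if group_name ∈ v then []
       else (pvGoA od (PySem.Set.add v group_name) (PySem.Dict.getD od group_name []) []).1) =
        (if group_name ∈ v then []
         else pvAltLoop od (PySem.Set.add v group_name) [PySem.Dict.getD od group_name []] []) := by
    intro od v
    by_cases hv : group_name ∈ v
    · simp [hv]
    · simp only [if_neg hv]
      rw [pvAltLoop_fold od ((pvS od + 2) * pvMu od (PySem.Set.add v group_name) +
          (PySem.Dict.getD od group_name []).length) (PySem.Set.add v group_name)
          (PySem.Dict.getD od group_name []) le_rfl [] []]
      rw [pvAltLoop]
  cases visited with
  | none =>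
    simpa only [resolve_optional_dependencies, resolve_optional_dependencies_alt] using
      (main (PySem.Dict.ofList optional_deps) PySem.Set.empty).symm.symm
  | some l =>
    simpa only [resolve_optional_dependencies, resolve_optional_dependencies_alt] using
      (main (PySem.Dict.ofList optional_deps) (PySem.Set.ofList l)).symm.symm
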